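-- pv_equiv track=rewrite | github.com/id-milan/05_Skripte | 2021-11 PX2DT/plaxisparser/mat_parameters.py | parse_mohr_coulomb
-- ===== SOURCE A (Python) =====
-- def parse_mohr_coulomb(tokens):
--     """Parse Mohr-Coulomb material parameters."""
--     params = [
--         "Identification",
--         "SoilModel",
--         "Colour",
--         "gammaUnsat",
--         "gammaSat",
--         "ERef",
--         "nu",
--         "cRef",
--         "phi",
--     ]
--
--     # Initialize an empty dictionary to store parameters and their values
--     parsed_params = {}
--
--     # Iterate over each parameter
--     for param in params:
--         # Check if the parameter is in the tokens list (strip quotes for comparison)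
--         stripped_tokens = [token.replace('"', "") for token in tokens]
--         if param in stripped_tokens:
--             # Find the index of the parameter
--             param_index = stripped_tokens.index(param)
--             # Get the value following the parameter, remove quotes, and store in the dictionary
--             param_value = tokens[param_index + 1].replace('"', "")
--             parsed_params[param] = param_value
--
--     return parsed_params
-- ===== SOURCE B (Python) =====
-- def parse_mohr_coulomb(tokens):
--     """Parse Mohr-Coulomb material parameters (single pass over tokens)."""
--     order = [
--         "Identification",
--         "SoilModel",
--         "Colour",
--         "gammaUnsat",
--         "gammaSat",
--         "ERef",
--         "nu",
--         "cRef",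
--         "phi",
--     ]
--     wanted = set(order)
--     found = {}
--     for tok, nxt in zip(tokens, tokens[1:]):
--         name = tok.replace('"', "")
--         if name in wanted and name not in found:
--             found[name] = nxt.replace('"', "")
--     return {p: found[p] for p in order if p in found}
-- ===== Notes on version B (the rewrite author's own statement) =====
-- stated objective: faster
-- what changed: B makes one pass over consecutive token pairs building a first-seen dict, then emits the entries in the fixed parameter order, instead of re-stripping the whole token list and rescanning it with .index once per parameter.
-- crash fix: A raises IndexError when the first (quote-stripped) occurrence of a wanted parameter is the last token; B's zip over consecutive pairs simply never pairs the last token and returns the dict built from the rest. — e.g. on parse_mohr_coulomb(["phi"]): A raises IndexError, B returns []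
import Mathlib
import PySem

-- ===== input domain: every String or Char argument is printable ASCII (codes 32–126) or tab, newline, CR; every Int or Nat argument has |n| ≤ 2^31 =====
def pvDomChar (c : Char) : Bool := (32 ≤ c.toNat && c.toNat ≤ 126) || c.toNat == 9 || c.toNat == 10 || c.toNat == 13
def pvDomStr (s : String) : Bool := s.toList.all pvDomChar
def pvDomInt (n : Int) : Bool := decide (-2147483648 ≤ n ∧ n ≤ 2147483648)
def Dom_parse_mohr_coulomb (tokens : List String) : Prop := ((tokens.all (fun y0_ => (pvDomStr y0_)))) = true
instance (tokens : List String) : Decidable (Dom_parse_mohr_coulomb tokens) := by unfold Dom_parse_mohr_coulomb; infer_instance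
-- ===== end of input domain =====

-- B replaces A's nine rescans (re-strip the whole token list + .index per parameter) by one pass
-- over consecutive token pairs building a first-seen dict, then emits entries in parameter order.

-- token.replace('"', "")
def pvStrip (s : String) : String := PySem.Str.replace s "\"" ""

-- the fixed list of wanted parameter names (shared literal)
def pvParams : List String :=
  ["Identification", "SoilModel", "Colour", "gammaUnsat", "gammaSat", "ERef", "nu", "cRef", "phi"]

-- ===== PORT A =====
def parse_mohr_coulomb (tokens : List String) : List (String × String) :=
  (pvParams.foldl (fun parsed param =>
      let stripped := tokens.map (fun t => pvStrip t)
      if param ∈ stripped then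
        match PySem.List.index? stripped param with
        | some idx =>
          match PySem.List.pyGet? tokens ((idx : Int) + 1) with
          | some v => parsed.insert param (pvStrip v)
          | none => parsed   -- Python raises IndexError here (excluded by Pre_)
        | none => parsed     -- unreachable: param ∈ stripped
      else parsed)
    (PySem.Dict.empty : PySem.Dict String String)).items

-- ===== PORT B =====
def parse_mohr_coulomb_alt (tokens : List String) : List (String × String) :=
  let wanted : PySem.Set String := PySem.Set.ofList pvParams
  let found : PySem.Dict String String :=
    (tokens.zip (tokens.drop 1)).foldl
      (fun found pr =>
        let name := pvStrip pr.1
        if PySem.Set.contains wanted name && !(found.contains name) then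
          found.insert name (pvStrip pr.2)
        else found)
      PySem.Dict.empty
  (pvParams.foldl
      (fun d p => if found.contains p then d.insert p (found.getD p "") else d)
      (PySem.Dict.empty : PySem.Dict String String)).items

-- ===== PRECONDITION & SPEC =====
-- Pre_ excludes exactly the inputs where A raises IndexError: the first quote-stripped
-- occurrence of a wanted parameter name is the very last token (no value follows it).
def Pre_parse_mohr_coulomb (tokens : List String) : Prop :=
  pvStrip (tokens.getLastD "") ∈ pvParams →
    pvStrip (tokens.getLastD "") ∈ tokens.dropLast.map pvStrip
instance (tokens : List String) : Decidable (Pre_parse_mohr_coulomb tokens) := by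
  unfold Pre_parse_mohr_coulomb; infer_instance

def pvWitness_parse_mohr_coulomb : List String := ["\"phi\"", "30"]

-- A raises IndexError when the last token (quote-stripped) is a wanted parameter whose first
-- stripped occurrence it is; B's zip over consecutive pairs never pairs the last token and
-- returns the dict built from the rest.
def Raises_parse_mohr_coulomb (tokens : List String) : Prop :=
  tokens ≠ [] ∧ pvStrip (tokens.getLastD "") ∈ pvParams ∧
    pvStrip (tokens.getLastD "") ∉ tokens.dropLast.map pvStrip
instance (tokens : List String) : Decidable (Raises_parse_mohr_coulomb tokens) := by
  unfold Raises_parse_mohr_coulomb; infer_instance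

def pvRaiseWitness_parse_mohr_coulomb : List String := ["phi"]
def pvRaiseWitnessOut_parse_mohr_coulomb : List (String × String) := []

def Spec_parse_mohr_coulomb (tokens : List String) (out : List (String × String)) : Prop :=
  out = parse_mohr_coulomb_alt tokens
instance (tokens : List String) (out : List (String × String)) : Decidable (Spec_parse_mohr_coulomb tokens out) := by
  unfold Spec_parse_mohr_coulomb; infer_instance

-- ===== CLAIM (what is proved, stated in full; the proofs are below) =====
def Claim_equal_parse_mohr_coulomb : Prop :=
  ∀ (tokens : List String), Dom_parse_mohr_coulomb tokens → Pre_parse_mohr_coulomb tokens →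
    Spec_parse_mohr_coulomb tokens (parse_mohr_coulomb tokens)

def Claim_raises_parse_mohr_coulomb : Prop :=
  (∀ (tokens : List String), Dom_parse_mohr_coulomb tokens → Raises_parse_mohr_coulomb tokens →
      ¬ Pre_parse_mohr_coulomb tokens) ∧
  (Dom_parse_mohr_coulomb (pvRaiseWitness_parse_mohr_coulomb) ∧
    Raises_parse_mohr_coulomb (pvRaiseWitness_parse_mohr_coulomb) ∧
    parse_mohr_coulomb_alt (pvRaiseWitness_parse_mohr_coulomb) = pvRaiseWitnessOut_parse_mohr_coulomb)

-- ===== LEMMAS AND PROOFS =====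

-- the value A/B associate with name p in tokens: quote-stripped token following the first
-- token whose stripped form is p (none if p never occurs stripped, or occurs only last)
def pvFv (p : String) : List String → Option String
  | [] => none
  | t :: rest => if pvStrip t = p then rest.head?.map pvStrip else pvFv p rest

lemma pvFv_eq_none_of_not_mem (p : String) (l : List String) (h : p ∉ l.map pvStrip) :
    pvFv p l = none := by
  induction l with
  | nil => rfl
  | cons t rest ih =>
    simp only [List.map_cons, List.mem_cons, not_or] at h
    simp only [pvFv, if_neg (fun hc : pvStrip t = p => h.1 hc.symm)]
    exact ih h.2

lemma stepA_eq (tokens : List String) (p : String) (d : PySem.Dict String String) :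
    (if p ∈ tokens.map (fun t => pvStrip t) then
      match PySem.List.index? (tokens.map (fun t => pvStrip t)) p with
      | some idx =>
        match PySem.List.pyGet? tokens ((idx : Int) + 1) with
        | some v => d.insert p (pvStrip v)
        | none => d
      | none => d
    else d)
    = match pvFv p tokens with
      | some w => d.insert p w
      | none => d := by
  induction tokens with
  | nil => simp [pvFv]
  | cons t rest ih =>
    by_cases h : pvStrip t = p
    · subst h
      simp only [List.map_cons, List.mem_cons, true_or, if_pos,
        PySem.List.index?_cons_self, pvFv]
      cases rest with
      | nil => simp [PySem.List.pyGet?, PySem.List.pyIdx?]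
      | cons t2 rest2 =>
        have h0 := PySem.List.pyGet?_cons_succ t (t2 :: rest2) 0
        rw [h0]
        simp
    · have hne : pvStrip t ≠ p := h
      by_cases hm : p ∈ rest.map (fun t => pvStrip t)
      · obtain ⟨k, hk⟩ := Option.isSome_iff_exists.mp
          ((PySem.List.index?_isSome_iff (rest.map (fun t => pvStrip t)) p).mpr hm)
        have hcons : PySem.List.index? ((t :: rest).map (fun t => pvStrip t)) p
            = some (k + 1) := by
          simp only [List.map_cons]
          rw [PySem.List.index?_cons_of_ne _ hne, hk]; rfl
        have hget : PySem.List.pyGet? (t :: rest) (((k + 1 : Nat) : Int) + 1)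
            = PySem.List.pyGet? rest ((k : Int) + 1) := by
          have h1 := PySem.List.pyGet?_cons_succ t rest (k + 1)
          push_cast at h1 ⊢
          rw [h1]
        have hmem : p ∈ List.map (fun t => pvStrip t) (t :: rest) := by
          simp only [List.map_cons, List.mem_cons]; exact Or.inr hm
        rw [if_pos hmem, hcons]
        dsimp only
        rw [hget]
        have hfv : pvFv p (t :: rest) = pvFv p rest := by simp [pvFv, h]
        rw [hfv, ← ih, if_pos hm, hk]
      · have hnm : p ∉ (t :: rest).map (fun t => pvStrip t) := by
          simp only [List.map_cons, List.mem_cons, not_or]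
          exact ⟨fun hc : p = pvStrip t => hne hc.symm, hm⟩
        rw [if_neg hnm]
        have hfv : pvFv p (t :: rest) = none := by
          simp only [pvFv, if_neg h]
          exact pvFv_eq_none_of_not_mem p rest hm
        rw [hfv]

lemma A_eq_fold (tokens : List String) :
    parse_mohr_coulomb tokens
    = (pvParams.foldl (fun d p =>
        match pvFv p tokens with
        | some w => d.insert p w
        | none => d) (PySem.Dict.empty : PySem.Dict String String)).items := by
  unfold parse_mohr_coulomb
  congr 1
  apply PySem.List.foldl_congr_mem
  intro acc x _
  exact stepA_eq tokens x acc

-- the single pass builds exactly pvFv for every wanted name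
lemma B_found (tokens : List String) (d : PySem.Dict String String) (p : String)
    (hp : p ∈ pvParams) :
    ((tokens.zip (tokens.drop 1)).foldl
      (fun found pr =>
        let name := pvStrip pr.1
        if PySem.Set.contains (PySem.Set.ofList pvParams) name && !(found.contains name) then
          found.insert name (pvStrip pr.2)
        else found) d).get? p
    = match d.get? p with
      | some v => some v
      | none => pvFv p tokens := by
  induction tokens generalizing d with
  | nil => cases hd : d.get? p <;> simp [pvFv, hd]
  | cons t rest ih =>
    cases rest with
    | nil =>
      have hfv : pvFv p [t] = none := by
        simp only [pvFv]; split <;> rfl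
      simp only [List.drop_succ_cons, List.drop_nil, List.zip_nil_right, List.foldl_nil, hfv]
      cases hd : d.get? p <;> simp
    | cons t2 rest2 =>
      have hzip : (t :: t2 :: rest2).zip ((t :: t2 :: rest2).drop 1)
          = (t, t2) :: ((t2 :: rest2).zip ((t2 :: rest2).drop 1)) := rfl
      rw [hzip, List.foldl_cons, ih]
      by_cases h : pvStrip t = p
      · have hw : PySem.Set.contains (PySem.Set.ofList pvParams) (pvStrip t) = true := by
          rw [h]
          simp [PySem.Set.contains, PySem.Set.mem_ofList, hp]
        have hfv : pvFv p (t :: t2 :: rest2) = some (pvStrip t2) := by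
          simp [pvFv, h]
        cases hd : d.get? p with
        | none =>
          have hc : d.contains (pvStrip t) = false := by
            rw [h, PySem.Dict.contains_eq_isSome_get?, hd]; rfl
          have hcond : (PySem.Set.contains (PySem.Set.ofList pvParams) (pvStrip t)
              && !(d.contains (pvStrip t))) = true := by
            rw [hw, hc]; rfl
          rw [hfv, if_pos hcond, h, PySem.Dict.get?_insert_self]
        | some v =>
          have hc : d.contains (pvStrip t) = true := by
            rw [h, PySem.Dict.contains_eq_isSome_get?, hd]; rfl
          have hcond : (PySem.Set.contains (PySem.Set.ofList pvParams) (pvStrip t)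
              && !(d.contains (pvStrip t))) = false := by
            rw [hw, hc]; rfl
          dsimp only
          rw [hcond]
          simp only [Bool.false_eq_true, if_false]
          rw [hd]
      · have hfv : pvFv p (t :: t2 :: rest2) = pvFv p (t2 :: rest2) := by
          simp [pvFv, h]
        have hstep : (if ((PySem.Set.ofList pvParams).contains (pvStrip t)
              && !(d.contains (pvStrip t))) = true then
            d.insert (pvStrip t) (pvStrip t2) else d).get? p = d.get? p := by
          split
          · exact PySem.Dict.get?_insert_of_ne d _ (fun hc : p = pvStrip t => h hc.symm)
          · rfl
        dsimp only
        rw [hstep, hfv]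

lemma B_eq_fold (tokens : List String) :
    parse_mohr_coulomb_alt tokens
    = (pvParams.foldl (fun d p =>
        match pvFv p tokens with
        | some w => d.insert p w
        | none => d) (PySem.Dict.empty : PySem.Dict String String)).items := by
  simp only [parse_mohr_coulomb_alt]
  congr 1
  apply PySem.List.foldl_congr_mem
  intro acc x hx
  have hfound := B_found tokens PySem.Dict.empty x hx
  rw [PySem.Dict.get?_empty] at hfound
  cases hfv : pvFv x tokens with
  | none =>
    rw [hfv] at hfound
    rw [PySem.Dict.contains_eq_isSome_get?, hfound]
    simp
  | some w =>
    rw [hfv] at hfound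
    rw [PySem.Dict.contains_eq_isSome_get?, hfound,
      PySem.Dict.getD_of_get?_eq_some _ _ hfound]
    simp

-- ===== VERDICT (by name: the statement is the Claim_ definition above) =====
theorem parse_mohr_coulomb_spec : Claim_equal_parse_mohr_coulomb := by
  intro tokens _ _
  unfold Spec_parse_mohr_coulomb
  rw [A_eq_fold, B_eq_fold]

theorem parse_mohr_coulomb_raises : Claim_raises_parse_mohr_coulomb := by
  unfold Claim_raises_parse_mohr_coulomb
  refine ⟨?_, by decide⟩
  intro tokens _ hr hpre
  exact hr.2.2 (hpre hr.2.1)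

-- self-check: the raise witness lies inside the stated crash region (read off the raises theorem)
theorem parse_mohr_coulomb_raises_witness_ok :
    Raises_parse_mohr_coulomb pvRaiseWitness_parse_mohr_coulomb :=
  parse_mohr_coulomb_raises.2.2.1
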